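-- pv_equiv track=rewrite | github.com/h2k9971/programmers_python3 | 프로그래머스/0/120843. 공 던지기/공 던지기.py | solution
-- ===== SOURCE A (Python) =====
-- def solution(numbers, k):
--     answer = 0
--     size = len(numbers)
--
--     for i in range(k):
--
--         if i == 0:
--             continue
--         else:
--             answer = (answer + 2) % size
--
--     return answer + 1
-- ===== SOURCE B (Python) =====
-- def solution(numbers, k):
--     if k <= 1:
--         return 1
--     return 2 * (k - 1) % len(numbers) + 1
-- ===== Notes on version B (the rewrite author's own statement) =====
-- stated objective: simpler
-- what changed: replaced the throw-simulation loop over range(k) with the closed-form expression 2*(k-1) % len(numbers) + 1 (guarded by k <= 1)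
import Mathlib
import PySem

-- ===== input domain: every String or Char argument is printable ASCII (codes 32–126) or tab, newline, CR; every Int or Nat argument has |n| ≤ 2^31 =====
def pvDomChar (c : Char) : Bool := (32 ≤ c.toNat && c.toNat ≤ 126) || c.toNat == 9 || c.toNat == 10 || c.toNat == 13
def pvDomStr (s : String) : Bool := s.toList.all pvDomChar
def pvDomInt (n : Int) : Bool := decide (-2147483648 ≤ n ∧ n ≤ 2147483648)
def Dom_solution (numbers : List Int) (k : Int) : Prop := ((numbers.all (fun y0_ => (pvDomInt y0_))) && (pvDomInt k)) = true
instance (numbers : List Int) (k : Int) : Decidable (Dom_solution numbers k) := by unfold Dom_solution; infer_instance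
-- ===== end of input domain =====

-- B replaces A's ball-throw loop by the closed form 2*(k-1) % size + 1 (simpler: no loop).


-- ===== PORT A =====
-- literal port: answer = 0; for i in range(k): if i == 0: continue else answer = (answer+2) % size; return answer+1
def solution (numbers : List Int) (k : Int) : Int :=
  (PySem.List.pyRange 0 k 1).foldl
    (fun answer i => if i = 0 then answer else PySem.Int.mod (answer + 2) (numbers.length : Int)) 0
  + 1

-- ===== PORT B =====
def solution_alt (numbers : List Int) (k : Int) : Int :=
  if k ≤ 1 then 1
  else PySem.Int.mod (2 * (k - 1)) (numbers.length : Int) + 1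

-- ===== PRECONDITION & SPEC =====
-- Pre_ excludes only numbers = [] with k ≥ 2, where both Pythons raise ZeroDivisionError.
def Pre_solution (numbers : List Int) (k : Int) : Prop := numbers ≠ [] ∨ k ≤ 1
instance (numbers : List Int) (k : Int) : Decidable (Pre_solution numbers k) := by unfold Pre_solution; infer_instance
def pvWitness_solution : List Int × Int := ([1, 2, 3], 5)

def Spec_solution (numbers : List Int) (k : Int) (out : Int) : Prop := out = solution_alt numbers k
instance (numbers : List Int) (k : Int) (out : Int) : Decidable (Spec_solution numbers k out) := by unfold Spec_solution; infer_instance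

-- ===== CLAIM (what is proved, stated in full; the proofs are below) =====
def Claim_equal_solution : Prop := ∀ (numbers : List Int) (k : Int), Dom_solution numbers k → Pre_solution numbers k → Spec_solution numbers k (solution numbers k)

-- ===== LEMMAS AND PROOFS =====

-- the loop from 0 to n (n ≥ 1) computes 2*(n-1) mod size, for positive size
theorem solution_loop_closed (size : Int) (hs : 0 < size) :
    ∀ n : Nat, 1 ≤ n →
      (PySem.List.pyRange 0 (n : Int) 1).foldl
        (fun answer i => if i = 0 then answer else PySem.Int.mod (answer + 2) size) 0
      = PySem.Int.mod (2 * ((n : Int) - 1)) size := by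
  intro n hn
  induction n with
  | zero => omega
  | succ m ih =>
    by_cases hm : 1 ≤ m
    · have hsplit := PySem.List.pyRange_one_succ_right (a := 0) (b := (m : Int)) (by exact_mod_cast Nat.zero_le m)
      push_cast
      push_cast at hsplit
      rw [hsplit, List.foldl_append, ih hm]
      simp only [List.foldl_cons, List.foldl_nil]
      have hmne : ((m : Int)) ≠ 0 := by exact_mod_cast Nat.one_le_iff_ne_zero.mp hm
      rw [if_neg hmne]
      simp only [PySem.Int.mod_eq_emod_of_pos hs]
      have : (2 * ((m : Int) + 1 - 1)) = (2 * ((m : Int) - 1) + 2) := by ring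
      rw [Int.emod_add_emod, this]
    · have hm0 : m = 0 := by omega
      subst hm0
      have h1 : PySem.List.pyRange 0 1 1 = [0] := by decide
      push_cast
      rw [h1]
      simp [PySem.Int.mod_eq_emod_of_pos hs]

theorem solution_spec : Claim_equal_solution := by
  intro numbers k _ hpre
  unfold Spec_solution solution solution_alt
  by_cases hk : k ≤ 1
  · rw [if_pos hk]
    by_cases hk0 : k ≤ 0
    · rw [PySem.List.pyRange_one_eq_nil (by omega)]
      simp
    · have hk1 : k = 1 := by omega
      subst hk1
      have h1 : PySem.List.pyRange 0 1 1 = [0] := by decide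
      rw [h1]
      simp
  · rw [if_neg hk]
    have hne : numbers ≠ [] := by
      rcases hpre with h | h
      · exact h
      · omega
    have hs : 0 < (numbers.length : Int) := by
      have : numbers.length ≠ 0 := fun h => hne (List.eq_nil_of_length_eq_zero h)
      omega
    have hk2 : 1 ≤ k.toNat := by omega
    have hcast : k = ((k.toNat : Int)) := by omega
    rw [hcast]
    rw [solution_loop_closed (numbers.length : Int) hs k.toNat hk2]
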